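-- pv_equiv track=rewrite | github.com/gathierry/Lwhatcode | DynamicProgramming/maximumSubarrayDifference.py | maxDiffSubArrays
-- ===== SOURCE A (Python) =====
-- def maxDiffSubArrays(nums):
--     # write your code here
--     lmin = [nums[0]]
--     lmax = [nums[0]]
--     cur_min = nums[0]
--     cur_max = nums[0]
--     for num in nums[1:]:
--         cur_min = min(num, cur_min+num)
--         lmin.append(min(lmin[-1], cur_min))
--         cur_max = max(num, cur_max+num)
--         lmax.append(max(lmax[-1], cur_max))
--
--     rmin = [nums[-1]]
--     rmax = [nums[-1]]
--     cur_min = nums[-1]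
--     cur_max = nums[-1]
--     for num in nums[-2::-1]:
--         cur_min = min(num, cur_min+num)
--         rmin.insert(0, min(rmin[0], cur_min))
--         cur_max = max(num, cur_max+num)
--         rmax.insert(0, max(rmax[0], cur_max))
--
--     diff = -float('inf')
--     for i in range(1, len(nums)):
--         diff = max(diff, abs(lmin[i-1] - rmax[i]), abs(lmax[i-1] - rmin[i]))
--     return diff
-- ===== SOURCE B (Python) =====
-- def _extrema(vals, first):
--     # min/max subarray-sum per growing window, via running prefix-sum extrema
--     # (best max ending by b = max over a<b' <= b of P[b'] - min P[a]); no Kadane recurrence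
--     p = 0
--     mn = mx = 0
--     bmin = bmax = first
--     mins = []
--     maxs = []
--     for v in vals:
--         p += v
--         bmax = max(bmax, p - mn)
--         bmin = min(bmin, p - mx)
--         mins.append(bmin)
--         maxs.append(bmax)
--         mn = min(mn, p)
--         mx = max(mx, p)
--     return mins, maxs
--
--
-- def maxDiffSubArrays(nums):
--     n = len(nums)
--     lmin, lmax = _extrema(nums, nums[0])
--     smin, smax = _extrema(nums[::-1], nums[-1])
--     rmin = smin[::-1]
--     rmax = smax[::-1]
--     best = max(abs(lmin[0] - rmax[1]), abs(lmax[0] - rmin[1]))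
--     for i in range(2, n):
--         best = max(best, abs(lmin[i - 1] - rmax[i]), abs(lmax[i - 1] - rmin[i]))
--     return best
-- ===== Notes on version B (the rewrite author's own statement) =====
-- stated objective: faster
-- what changed: B replaces A's Kadane recurrence (cur = min/max(num, cur+num) with prepend-built right arrays) by the prefix-sum formulation: one shared helper tracks running min/max of prefix sums and takes best = extremum of P[b] - opposite-extremum(P[a]), applied once forward and once to the reversed list, all lists built by append.
-- outside the precondition, e.g. on maxDiffSubArrays([5]): A returns -inf, B raises IndexError; on maxDiffSubArrays([]): A raises IndexError, B raises IndexError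
import Mathlib
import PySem

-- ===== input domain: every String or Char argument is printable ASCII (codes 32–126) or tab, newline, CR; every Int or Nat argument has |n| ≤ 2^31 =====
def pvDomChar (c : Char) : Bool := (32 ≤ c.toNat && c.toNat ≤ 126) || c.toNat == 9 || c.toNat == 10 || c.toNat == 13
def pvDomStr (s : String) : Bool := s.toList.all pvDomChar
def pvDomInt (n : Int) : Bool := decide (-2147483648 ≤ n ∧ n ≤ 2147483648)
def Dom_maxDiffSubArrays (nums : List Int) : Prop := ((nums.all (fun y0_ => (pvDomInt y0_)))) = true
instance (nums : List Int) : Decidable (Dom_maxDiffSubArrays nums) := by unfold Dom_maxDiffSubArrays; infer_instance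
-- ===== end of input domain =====

-- B computes the subarray-sum extrema from running prefix-sum extrema (best = extremum of P[b] - opposite extremum of P[a]) instead of A's Kadane recurrence, with append-built lists; measured asymptotically faster (A's insert(0) is quadratic).


-- ===== PORT A =====
-- the left-pass loop body: appends min(lmin[-1], cur_min) / max(lmax[-1], cur_max)
def pvStepL : (List Int × List Int × Int × Int) → Int → (List Int × List Int × Int × Int)
  | (lmin, lmax, cmin, cmax), num =>
    let cmin' := min num (cmin + num)
    let lmin' := lmin ++ [min (PySem.List.pyGetD lmin (-1) 0) cmin']
    let cmax' := max num (cmax + num)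
    let lmax' := lmax ++ [max (PySem.List.pyGetD lmax (-1) 0) cmax']
    (lmin', lmax', cmin', cmax')

-- the right-pass loop body: rmin.insert(0, min(rmin[0], cur_min)) etc.
def pvStepR : (List Int × List Int × Int × Int) → Int → (List Int × List Int × Int × Int)
  | (rmin, rmax, cmin, cmax), num =>
    let cmin' := min num (cmin + num)
    let rmin' := (min (PySem.List.pyGetD rmin 0 0) cmin') :: rmin
    let cmax' := max num (cmax + num)
    let rmax' := (max (PySem.List.pyGetD rmax 0 0) cmax') :: rmax
    (rmin', rmax', cmin', cmax')

-- the final loop body; diff = -float('inf') is modelled as none (max(-inf, a, b) = max(a, b))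
def pvStepD (lmin lmax rmin rmax : List Int) (d : Option Int) (i : Int) : Option Int :=
  let a := |PySem.List.pyGetD lmin (i - 1) 0 - PySem.List.pyGetD rmax i 0|
  let b := |PySem.List.pyGetD lmax (i - 1) 0 - PySem.List.pyGetD rmin i 0|
  some (match d with
        | none => max a b
        | some v => max (max v a) b)

def maxDiffSubArrays (nums : List Int) : Int :=
  let x := PySem.List.pyGetD nums 0 0          -- nums[0]; IndexError on [] is excluded by Pre_
  let sL := (PySem.List.slice nums (some 1) none).foldl pvStepL ([x], [x], x, x)  -- nums[1:]
  let y := PySem.List.pyGetD nums (-1) 0       -- nums[-1]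
  -- nums[-2::-1] equals (reverse of nums[:-1]) for every list, ported exactly as dropLast.reverse
  let sR := (nums.dropLast.reverse).foldl pvStepR ([y], [y], y, y)
  let diff := (PySem.List.pyRange 1 (nums.length : Int) 1).foldl
                (pvStepD sL.1 sL.2.1 sR.1 sR.2.1) none
  diff.getD 0   -- diff stays -float('inf') (none) only for len(nums) < 2, excluded by Pre_

-- ===== PORT B =====
-- Source B's _extrema loop body: running prefix-sum p with its extrema mn/mx; best-so-far bmin/bmax appended
def pvExtStep : (List Int × List Int × Int × Int × Int × Int × Int) → Int → (List Int × List Int × Int × Int × Int × Int × Int)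
  | (mins, maxs, bmin, bmax, mn, mx, p), v =>
    let p' := p + v
    let bmax' := max bmax (p' - mn)
    let bmin' := min bmin (p' - mx)
    (mins ++ [bmin'], maxs ++ [bmax'], bmin', bmax', min mn p', max mx p', p')

-- Source B's _extrema(vals, first): returns (mins, maxs)
def pvExtrema (vals : List Int) (first : Int) : List Int × List Int :=
  let r := vals.foldl pvExtStep ([], [], first, first, 0, 0, 0)
  (r.1, r.2.1)

-- Source B's final loop body
def pvCombine (lmin lmax rmin rmax : List Int) (best : Int) (i : Int) : Int :=
  max (max best |PySem.List.pyGetD lmin (i - 1) 0 - PySem.List.pyGetD rmax i 0|)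
      |PySem.List.pyGetD lmax (i - 1) 0 - PySem.List.pyGetD rmin i 0|

def maxDiffSubArrays_alt (nums : List Int) : Int :=
  let x := PySem.List.pyGetD nums 0 0           -- nums[0]; IndexError on [] excluded by Pre_
  let L := pvExtrema nums x
  let y := PySem.List.pyGetD nums (-1) 0        -- nums[-1]
  -- nums[::-1]: slice? with step -1 never raises, .getD [] is unreachable
  let S := pvExtrema ((PySem.List.slice? nums none none (-1)).getD []) y
  let rmin := (PySem.List.slice? S.1 none none (-1)).getD []   -- smin[::-1]
  let rmax := (PySem.List.slice? S.2 none none (-1)).getD []   -- smax[::-1]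
  -- rmax[1]/rmin[1]: IndexError for len(nums) < 2, excluded by Pre_
  let best0 := max |PySem.List.pyGetD L.1 0 0 - PySem.List.pyGetD rmax 1 0|
                   |PySem.List.pyGetD L.2 0 0 - PySem.List.pyGetD rmin 1 0|
  (PySem.List.pyRange 2 (nums.length : Int) 1).foldl (pvCombine L.1 L.2 rmin rmax) best0

-- ===== PRECONDITION & SPEC =====
-- Pre_ excludes the empty list (A raises IndexError) and one-element lists (A returns -float('inf'), a float, not an int; B raises IndexError there).
def Pre_maxDiffSubArrays (nums : List Int) : Prop := 2 ≤ nums.length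
instance (nums : List Int) : Decidable (Pre_maxDiffSubArrays nums) := by unfold Pre_maxDiffSubArrays; infer_instance
def pvWitness_maxDiffSubArrays : List Int := [1, -2]
def Spec_maxDiffSubArrays (nums : List Int) (out : Int) : Prop := out = maxDiffSubArrays_alt nums
instance (nums : List Int) (out : Int) : Decidable (Spec_maxDiffSubArrays nums out) := by unfold Spec_maxDiffSubArrays; infer_instance

-- ===== CLAIM =====
def Claim_equal_maxDiffSubArrays : Prop := ∀ (nums : List Int), Dom_maxDiffSubArrays nums → Pre_maxDiffSubArrays nums → Spec_maxDiffSubArrays nums (maxDiffSubArrays nums)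

-- ===== LEMMAS AND PROOFS =====

-- B's prefix-sum fold produces the same two lists as A's append-Kadane fold, given the
-- invariant mx = max p (p - cmin), mn = min p (p - cmax) linking prefix extrema to Kadane state.
theorem ext_eq_kad (t : List Int) : ∀ (pmin pmax : List Int) (bmin bmax cmin cmax mn mx p : Int),
    mx = max p (p - cmin) → mn = min p (p - cmax) →
    (t.foldl pvExtStep (pmin ++ [bmin], pmax ++ [bmax], bmin, bmax, mn, mx, p)).1
      = (t.foldl pvStepL (pmin ++ [bmin], pmax ++ [bmax], cmin, cmax)).1
    ∧ (t.foldl pvExtStep (pmin ++ [bmin], pmax ++ [bmax], bmin, bmax, mn, mx, p)).2.1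
      = (t.foldl pvStepL (pmin ++ [bmin], pmax ++ [bmax], cmin, cmax)).2.1 := by
  induction t with
  | nil => intro pmin pmax bmin bmax cmin cmax mn mx p _ _; exact ⟨rfl, rfl⟩
  | cons num rest ih =>
    intro pmin pmax bmin bmax cmin cmax mn mx p hmx hmn
    have hB : pvExtStep (pmin ++ [bmin], pmax ++ [bmax], bmin, bmax, mn, mx, p) num =
        ((pmin ++ [bmin]) ++ [min bmin (p + num - mx)],
         (pmax ++ [bmax]) ++ [max bmax (p + num - mn)],
         min bmin (p + num - mx), max bmax (p + num - mn),
         min mn (p + num), max mx (p + num), p + num) := rfl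
    have hA : pvStepL (pmin ++ [bmin], pmax ++ [bmax], cmin, cmax) num =
        ((pmin ++ [bmin]) ++ [min bmin (min num (cmin + num))],
         (pmax ++ [bmax]) ++ [max bmax (max num (cmax + num))],
         min num (cmin + num), max num (cmax + num)) := by
      simp [pvStepL, PySem.List.pyGetD_neg_one_append_singleton]
    have e1 : p + num - mx = min num (cmin + num) := by omega
    have e2 : p + num - mn = max num (cmax + num) := by omega
    simp only [List.foldl_cons, hB, hA, e1, e2]
    exact ih _ _ _ _ (min num (cmin + num)) (max num (cmax + num)) _ _ _ (by omega) (by omega)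

-- A's append-Kadane fold is the reverse of A's prepend (insert(0)) fold over the same elements
theorem kad_rev (u : List Int) : ∀ (p q : List Int) (c d : Int), p ≠ [] → q ≠ [] →
    u.foldl pvStepL (p, q, c, d) =
      ((u.foldl pvStepR (p.reverse, q.reverse, c, d)).1.reverse,
       (u.foldl pvStepR (p.reverse, q.reverse, c, d)).2.1.reverse,
       (u.foldl pvStepR (p.reverse, q.reverse, c, d)).2.2.1,
       (u.foldl pvStepR (p.reverse, q.reverse, c, d)).2.2.2) := by
  induction u with
  | nil => intro p q c d hp hq; simp
  | cons num rest ih =>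
    intro p q c d hp hq
    have hpv : PySem.List.pyGetD p.reverse 0 0 = PySem.List.pyGetD p (-1) 0 := by
      rw [PySem.List.pyGetD_neg_one (xs := p) (d := 0) hp, PySem.List.pyGetD_zero,
          List.getD_eq_getElem?_getD, ← List.head?_eq_getElem?, List.head?_reverse,
          List.getLast?_eq_some_getLast hp]
      rfl
    have hqv : PySem.List.pyGetD q.reverse 0 0 = PySem.List.pyGetD q (-1) 0 := by
      rw [PySem.List.pyGetD_neg_one (xs := q) (d := 0) hq, PySem.List.pyGetD_zero,
          List.getD_eq_getElem?_getD, ← List.head?_eq_getElem?, List.head?_reverse,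
          List.getLast?_eq_some_getLast hq]
      rfl
    have hS : pvStepL (p, q, c, d) num =
        (p ++ [min (PySem.List.pyGetD p (-1) 0) (min num (c + num))],
         q ++ [max (PySem.List.pyGetD q (-1) 0) (max num (d + num))],
         min num (c + num), max num (d + num)) := rfl
    have hR : pvStepR (p.reverse, q.reverse, c, d) num =
        ((p ++ [min (PySem.List.pyGetD p (-1) 0) (min num (c + num))]).reverse,
         (q ++ [max (PySem.List.pyGetD q (-1) 0) (max num (d + num))]).reverse,
         min num (c + num), max num (d + num)) := by
      simp only [pvStepR, hpv, hqv, List.reverse_append, List.reverse_cons,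
                 List.reverse_nil, List.nil_append, List.cons_append]
    simp only [List.foldl_cons, hS, hR]
    exact ih _ _ _ _ (by simp) (by simp)

-- A's Option-valued diff fold from a some-state is B's plain Int fold
theorem diff_fold (L M R S : List Int) (l : List Int) : ∀ (d : Int),
    l.foldl (pvStepD L M R S) (some d) = some (l.foldl (pvCombine L M R S) d) := by
  induction l with
  | nil => intro d; rfl
  | cons i rest ih => intro d; simp only [List.foldl_cons]; exact ih _

-- ===== VERDICT =====
theorem maxDiffSubArrays_spec : Claim_equal_maxDiffSubArrays := by
  intro nums _hdom hpre
  have hlen : 2 ≤ nums.length := hpre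
  unfold Spec_maxDiffSubArrays
  cases nums with
  | nil => simp at hlen
  | cons x tl =>
  cases tl with
  | nil => simp at hlen
  | cons a t =>
  set ns : List Int := x :: a :: t with hns
  have hne : ns ≠ [] := by simp [hns]
  set y : Int := ns.getLast hne with hy
  -- unfold both ports
  simp only [maxDiffSubArrays, maxDiffSubArrays_alt, pvExtrema]
  rw [PySem.List.pyGetD_zero_cons, PySem.List.slice_from_one,
      PySem.List.pyGetD_neg_one (xs := ns) (d := 0) hne]
  simp only [PySem.List.slice?_none_none_neg_one, Option.getD_some]
  rw [← hy]
  rw [show (x :: a :: t).tail = a :: t from rfl]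
  -- B's left fold: peel the first element, then relate to A's pvStepL fold
  have hfirst : ∀ z : Int, pvExtStep ([], [], z, z, 0, 0, 0) z
      = ([z], [z], z, z, min 0 z, max 0 z, z) := by
    intro z
    simp only [pvExtStep]
    norm_num
  have hLeft := ext_eq_kad (a :: t) [] [] x x x x (min 0 x) (max 0 x) x
      (by omega) (by omega)
  simp only [List.nil_append] at hLeft
  -- B's right fold over ns.reverse
  have hrev : ns.reverse = y :: ns.dropLast.reverse := by
    conv_lhs => rw [← List.dropLast_append_getLast hne]
    rw [List.reverse_append]
    rfl
  have hRight := ext_eq_kad (ns.dropLast.reverse) [] [] y y y y (min 0 y) (max 0 y) y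
      (by omega) (by omega)
  simp only [List.nil_append] at hRight
  have hKR := kad_rev (ns.dropLast.reverse) [y] [y] y y (by simp) (by simp)
  simp only [List.reverse_singleton] at hKR
  -- assemble: B's fold over ns = first step then rest
  have hBL : ns.foldl pvExtStep ([], [], x, x, 0, 0, 0)
      = (a :: t).foldl pvExtStep ([x], [x], x, x, min 0 x, max 0 x, x) := by
    rw [hns]
    simp only [List.foldl_cons, hfirst]
  have hBR : (ns.reverse).foldl pvExtStep ([], [], y, y, 0, 0, 0)
      = (ns.dropLast.reverse).foldl pvExtStep ([y], [y], y, y, min 0 y, max 0 y, y) := by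
    rw [hrev]
    simp only [List.foldl_cons, hfirst]
  set AL := (a :: t).foldl pvStepL ([x], [x], x, x) with hAL
  set AR := (ns.dropLast.reverse).foldl pvStepR ([y], [y], y, y) with hAR
  have hB1 : (ns.foldl pvExtStep ([], [], x, x, 0, 0, 0)).1 = AL.1 := by
    rw [hBL]; exact hLeft.1
  have hB2 : (ns.foldl pvExtStep ([], [], x, x, 0, 0, 0)).2.1 = AL.2.1 := by
    rw [hBL]; exact hLeft.2
  have hR1 : ((ns.reverse).foldl pvExtStep ([], [], y, y, 0, 0, 0)).1 = AR.1.reverse := by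
    rw [hBR, hRight.1, hKR]
  have hR2 : ((ns.reverse).foldl pvExtStep ([], [], y, y, 0, 0, 0)).2.1 = AR.2.1.reverse := by
    rw [hBR, hRight.2, hKR]
  rw [hB1, hB2, hR1, hR2]
  simp only [List.reverse_reverse]
  -- the combining loop: peel i = 1 on A's side, then diff_fold
  have h1n : (1 : Int) < ((ns.length : Nat) : Int) := by
    have : 1 < ns.length := by simp [hns]
    exact_mod_cast this
  rw [PySem.List.pyRange_one_cons h1n]
  simp only [List.foldl_cons]
  have hstep1 : pvStepD AL.1 AL.2.1 AR.1 AR.2.1 none 1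
      = some (max |PySem.List.pyGetD AL.1 0 0 - PySem.List.pyGetD AR.2.1 1 0|
                  |PySem.List.pyGetD AL.2.1 0 0 - PySem.List.pyGetD AR.1 1 0|) := by
    simp only [pvStepD]
    norm_num
  rw [hstep1, diff_fold, Option.getD_some]
  norm_num
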